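-- pv_equiv track=rewrite | github.com/gh0stintheshe11/LeetCode-Solutions | solutions/1503.reducing-dishes/Python3.py | maxSatisfaction
-- ===== SOURCE A (Python) =====
-- from typing import List
--
-- def maxSatisfaction(satisfaction: List[int]) -> int:
--     satisfaction.sort(reverse=True)
--     max_coefficient = 0
--     current_sum = 0
--     total = 0
--
--     for sat in satisfaction:
--         current_sum += sat
--         if current_sum + total > total:
--             total += current_sum
--         else:
--             break
--
--     return total
-- ===== SOURCE B (Python) =====
-- def maxSatisfaction(satisfaction):
--     satisfaction.sort(reverse=True)
--     best = 0
--     for k in range(1, len(satisfaction) + 1):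
--         coeff = 0
--         for i, s in enumerate(satisfaction[:k]):
--             coeff += (k - i) * s
--         if coeff > best:
--             best = coeff
--     return best
-- ===== Notes on version B (the rewrite author's own statement) =====
-- stated objective: alternative
-- what changed: Replaces A's single greedy pass with break (accumulate prefix sums while positive) by an explicit enumeration over the number k of dishes kept, computing each candidate's weighted sum directly and taking the maximum with baseline 0.
import Mathlib
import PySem

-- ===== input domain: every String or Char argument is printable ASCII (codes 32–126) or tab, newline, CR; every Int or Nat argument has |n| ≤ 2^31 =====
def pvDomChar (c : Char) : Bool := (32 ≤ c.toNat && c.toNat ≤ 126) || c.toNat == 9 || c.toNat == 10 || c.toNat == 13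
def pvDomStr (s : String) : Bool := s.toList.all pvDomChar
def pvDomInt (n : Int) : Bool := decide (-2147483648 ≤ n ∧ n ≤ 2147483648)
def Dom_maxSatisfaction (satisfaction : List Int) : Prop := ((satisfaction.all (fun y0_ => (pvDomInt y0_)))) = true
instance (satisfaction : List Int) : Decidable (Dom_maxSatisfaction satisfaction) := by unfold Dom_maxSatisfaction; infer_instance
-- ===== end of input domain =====

-- B replaces A's greedy accumulate-while-positive pass by an explicit enumeration over the
-- number k of dishes kept (alternative decomposition, same return value; both sort the
-- argument in place in Python, so the in-place mutation side effect is identical).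


-- ===== PORT A =====
-- the for-loop with break over the sorted list, carrying (current_sum, total)
def pvLoopA : List Int → Int → Int → Int
  | [], _, total => total
  | sat :: rest, current_sum, total =>
      let cs := current_sum + sat
      if cs + total > total then pvLoopA rest cs (total + cs) else total

def maxSatisfaction (satisfaction : List Int) : Int :=
  let ss := PySem.List.sorted satisfaction (fun x => x) true
  pvLoopA ss 0 0

-- ===== PORT B =====
def maxSatisfaction_alt (satisfaction : List Int) : Int :=
  let ss := PySem.List.sorted satisfaction (fun x => x) true
  (PySem.List.pyRange 1 ((ss.length : Int) + 1) 1).foldl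
    (fun best k =>
      let coeff :=
        (PySem.List.enumerate (PySem.List.slice ss none (some k)) 0).foldl
          (fun c p => c + (k - p.1) * p.2) 0
      if coeff > best then coeff else best)
    0

-- ===== PRECONDITION & SPEC =====
def Spec_maxSatisfaction (satisfaction : List Int) (out : Int) : Prop := out = maxSatisfaction_alt satisfaction
instance (satisfaction : List Int) (out : Int) : Decidable (Spec_maxSatisfaction satisfaction out) := by unfold Spec_maxSatisfaction; infer_instance

-- ===== CLAIM (what is proved, stated in full; the proofs are below) =====
def Claim_equal_maxSatisfaction : Prop := ∀ (satisfaction : List Int), Dom_maxSatisfaction satisfaction → Spec_maxSatisfaction satisfaction (maxSatisfaction satisfaction)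

-- ===== LEMMAS AND PROOFS =====

-- best achievable extension value: max over k of the sum of the k running prefix sums,
-- starting from accumulated prefix sum cs
def pvBestExt : List Int → Int → Int
  | [], _ => 0
  | x :: l, cs => max 0 ((cs + x) + pvBestExt l (cs + x))

-- coefficient of taking the top k dishes of l, structurally
def pvC : List Int → Nat → Int
  | _, 0 => 0
  | [], _ + 1 => 0
  | x :: l, k + 1 => ((k : Int) + 1) * x + pvC l k

theorem pvBestExt_nonneg (l : List Int) (cs : Int) : 0 ≤ pvBestExt l cs := by
  cases l with
  | nil => simp [pvBestExt]
  | cons x l => simp [pvBestExt]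

theorem pvBestExt_nonpos (l : List Int) (cs : Int) (h1 : ∀ y ∈ l, y ≤ 0) (h2 : cs ≤ 0) :
    cs + pvBestExt l cs ≤ 0 := by
  induction l generalizing cs with
  | nil => simpa [pvBestExt] using h2
  | cons x l ih =>
      have hx : x ≤ 0 := h1 x (by simp)
      have hcs' : cs + x ≤ 0 := by omega
      have := ih (cs + x) (fun y hy => h1 y (by simp [hy])) hcs'
      simp only [pvBestExt]
      omega

theorem pvLoopA_eq (l : List Int) (cs t : Int)
    (hs : l.Pairwise (fun a b => b ≤ a)) (hcs : 0 ≤ cs) :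
    pvLoopA l cs t = t + pvBestExt l cs := by
  induction l generalizing cs t with
  | nil => simp [pvLoopA, pvBestExt]
  | cons x l ih =>
      have htail : l.Pairwise (fun a b => b ≤ a) := (List.pairwise_cons.mp hs).2
      by_cases h : 0 < cs + x
      · have : pvLoopA (x :: l) cs t = pvLoopA l (cs + x) (t + (cs + x)) := by
          simp only [pvLoopA]
          rw [if_pos (by omega)]
        rw [this, ih (cs + x) _ htail (by omega)]
        have hnn := pvBestExt_nonneg l (cs + x)
        simp only [pvBestExt]
        omega
      · have hx : x ≤ 0 := by omega
        have hall : ∀ y ∈ l, y ≤ 0 := fun y hy =>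
          le_trans ((List.pairwise_cons.mp hs).1 y hy) hx
        have hle := pvBestExt_nonpos l (cs + x) hall (by omega)
        have : pvLoopA (x :: l) cs t = t := by
          simp only [pvLoopA]
          rw [if_neg (by omega)]
        rw [this]
        simp only [pvBestExt]
        omega

-- foldl accumulating a sum equals initial plus the mapped sum
theorem pvFoldl_add_sum {α : Type} (f : α → Int) (xs : List α) (a : Int) :
    xs.foldl (fun c p => c + f p) a = a + (xs.map f).sum := by
  induction xs generalizing a with
  | nil => simp
  | cons x xs ih => simp [ih]; ring

-- shifting the start index of enumerate inside a mapped sum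
theorem pvEnum_shift {α : Type} (xs : List α) (s : Int) (g : Int × α → Int) :
    ((PySem.List.enumerate xs (s + 1)).map g).sum
      = ((PySem.List.enumerate xs s).map (fun p => g (p.1 + 1, p.2))).sum := by
  induction xs generalizing s with
  | nil => simp [PySem.List.enumerate_nil]
  | cons x xs ih => simp [PySem.List.enumerate_cons, ih]

-- the inner loop computes pvC
theorem pvInner_eq (l : List Int) (k : Nat) :
    ((PySem.List.enumerate (l.take k) 0).map (fun p => ((k : Int) - p.1) * p.2)).sum
      = pvC l k := by
  induction l generalizing k with
  | nil => cases k <;> simp [pvC, PySem.List.enumerate_nil]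
  | cons x l ih =>
      cases k with
      | zero => simp [pvC, PySem.List.enumerate_nil]
      | succ k =>
          simp only [List.take_succ_cons, PySem.List.enumerate_cons, List.map_cons,
            List.sum_cons, pvC]
          rw [pvEnum_shift (l.take k) 0]
          have hfun : (fun p : Int × Int => ((((k : Nat) + 1 : Nat) : Int) - (p.1 + 1)) * p.2)
              = (fun p : Int × Int => ((k : Int) - p.1) * p.2) := by
            funext p; push_cast; ring
          rw [hfun, ih k]
          push_cast; ring

-- hoisting a max out of a max-fold initial value
theorem pvFoldl_max_hoist {α : Type} (g : α → Int) (xs : List α) (a b : Int) :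
    xs.foldl (fun m j => max m (g j)) (max a b) = max a (xs.foldl (fun m j => max m (g j)) b) := by
  induction xs generalizing b with
  | nil => simp
  | cons x xs ih => simp only [List.foldl_cons, max_assoc, ih]

-- adding a constant inside a max-fold
theorem pvFoldl_max_shift {α : Type} (g : α → Int) (xs : List α) (c a : Int) :
    xs.foldl (fun m j => max m (c + g j)) (c + a) = c + xs.foldl (fun m j => max m (g j)) a := by
  induction xs generalizing a with
  | nil => simp
  | cons x xs ih =>
      simp only [List.foldl_cons]
      rw [max_add_add_left, ih]

-- the outer enumeration over k equals the greedy best-extension value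
theorem pvOuter_eq (l : List Int) (cs : Int) :
    (List.range l.length).foldl
        (fun m (j : Nat) => max m (((j : Int) + 1) * cs + pvC l (j + 1))) 0
      = pvBestExt l cs := by
  induction l generalizing cs with
  | nil => simp [pvBestExt]
  | cons x l ih =>
      simp only [List.length_cons, List.range_succ_eq_map, List.foldl_cons, List.foldl_map]
      have hf : (fun (m : Int) (j : Nat) => max m ((((Nat.succ j : Nat) : Int) + 1) * cs + pvC (x :: l) (Nat.succ j + 1)))
          = (fun (m : Int) (j : Nat) => max m ((cs + x) + (((j : Int) + 1) * (cs + x) + pvC l (j + 1)))) := by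
        funext m j
        congr 1
        show (((j + 1 : Nat) : Int) + 1) * cs + pvC (x :: l) (j + 1 + 1) = _
        simp only [pvC]
        push_cast
        ring
      have hinit : max 0 ((((0 : Nat) : Int) + 1) * cs + pvC (x :: l) (0 + 1)) = max 0 ((cs + x) + 0) := by
        congr 1
        simp only [pvC]
        push_cast
        ring
      rw [hf, hinit, pvFoldl_max_hoist, pvFoldl_max_shift]
      rw [ih (cs + x)]
      simp [pvBestExt]

-- B's port, after sorting, equals the best-extension value
theorem pvAltEq (l : List Int) :
    (PySem.List.pyRange 1 ((l.length : Int) + 1) 1).foldl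
        (fun best k =>
          let coeff :=
            (PySem.List.enumerate (PySem.List.slice l none (some k)) 0).foldl
              (fun c p => c + (k - p.1) * p.2) 0
          if coeff > best then coeff else best)
        0
      = pvBestExt l 0 := by
  rw [PySem.List.pyRange_one]
  simp only [add_sub_cancel_right, Int.toNat_natCast, List.foldl_map]
  have hf : (fun (best : Int) (j : Nat) =>
        let coeff :=
          (PySem.List.enumerate (PySem.List.slice l none (some ((1 : Int) + (j : Int)))) 0).foldl
            (fun c p => c + (((1 : Int) + (j : Int)) - p.1) * p.2) 0
        if coeff > best then coeff else best)
      = (fun (m : Int) (j : Nat) => max m (((j : Int) + 1) * 0 + pvC l (j + 1))) := by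
    funext best j
    have hk : (1 : Int) + (j : Int) = (((j + 1 : Nat) : Nat) : Int) := by push_cast; ring
    rw [hk, PySem.List.slice_to_natCast, pvFoldl_add_sum]
    have hw : (fun p : Int × Int => ((((j + 1 : Nat) : Nat) : Int) - p.1) * p.2)
        = (fun p : Int × Int => (((j + 1 : Nat) : Int) - p.1) * p.2) := rfl
    rw [hw, pvInner_eq l (j + 1)]
    simp only [zero_add]
    split_ifs <;> omega
  rw [hf, pvOuter_eq l 0]

-- ===== VERDICT (by name: the statement is the Claim_ definition above) =====
theorem maxSatisfaction_spec : Claim_equal_maxSatisfaction := by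
  intro s _
  unfold Spec_maxSatisfaction
  simp only [maxSatisfaction, maxSatisfaction_alt]
  have hp : (PySem.List.sorted s (fun x => x) true).Pairwise (fun a b => b ≤ a) := by
    simpa using PySem.List.sorted_pairwise_rev s (fun x => x)
  rw [pvLoopA_eq _ 0 0 hp le_rfl, pvAltEq]
  simp
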